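-- pv_equiv track=rewrite | github.com/shubhamkriitr/computer_vision | assignments/assignment_2/mean_shift/mean-shift_cow/mean-shift.py | get_batch_indices
-- ===== SOURCE A (Python) =====
-- def get_batch_indices(begin_, end_, workers):
--     batches = []
--     num_records = end_ - begin_ # end_ is exclusive
--     start = begin_
--     batch_size = num_records//workers
--     spill_over = num_records%workers
--     while start < end_:
--         this_end = start + batch_size
--         if spill_over > 0:
--             this_end += 1
--             spill_over -= 1
--         batches.append([start, this_end])
--         start = this_end
--     if len(batches) > 0 and batches[-1][1] > end_:
--         batches[-1][1] = end_
--     return batches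
-- ===== SOURCE B (Python) =====
-- def get_batch_indices(begin_, end_, workers):
--     num_records = end_ - begin_  # end_ is exclusive
--     batch_size, spill_over = divmod(num_records, workers)
--     n = min(workers, num_records) if num_records > 0 else 0
--     bound = lambda i: begin_ + i * batch_size + min(i, spill_over)
--     return [[bound(i), bound(i + 1)] for i in range(n)]
-- ===== Notes on version B (the rewrite author's own statement) =====
-- stated objective: simpler
-- what changed: Replaces the while-loop that mutates start/spill_over and the post-hoc last-element clamp with a closed-form boundary formula bound(i) = begin_ + i*batch_size + min(i, spill_over) and a comprehension over the exact batch count min(workers, num_records).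
import Mathlib
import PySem

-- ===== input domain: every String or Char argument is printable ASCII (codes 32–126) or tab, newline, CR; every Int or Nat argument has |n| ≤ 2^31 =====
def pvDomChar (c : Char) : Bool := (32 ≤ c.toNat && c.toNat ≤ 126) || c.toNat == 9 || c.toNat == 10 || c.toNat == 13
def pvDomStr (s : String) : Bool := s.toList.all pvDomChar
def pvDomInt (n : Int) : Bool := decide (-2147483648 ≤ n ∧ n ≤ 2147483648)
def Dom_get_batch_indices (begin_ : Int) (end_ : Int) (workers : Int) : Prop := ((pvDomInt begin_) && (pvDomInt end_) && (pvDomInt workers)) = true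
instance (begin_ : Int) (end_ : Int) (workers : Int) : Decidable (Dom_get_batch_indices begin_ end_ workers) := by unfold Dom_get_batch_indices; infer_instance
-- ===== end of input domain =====

-- B replaces A's mutating while-loop and post-hoc clamp by a closed-form per-index boundary formula (objective: simpler).


-- ===== PORT A =====
-- A's while-loop; fuel (end_-begin_).toNat suffices on Pre_ (each iteration advances start by ≥ 1 there)
def pvLoopA (end_ bs : Int) : Nat → Int → Int → List (List Int) → List (List Int)
  | 0, _, _, acc => acc
  | fuel+1, start, spill, acc =>
    if start < end_ then
      -- this_end = start + batch_size; if spill_over > 0: this_end += 1; spill_over -= 1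
      pvLoopA end_ bs fuel (if spill > 0 then start + bs + 1 else start + bs)
        (if spill > 0 then spill - 1 else spill)
        (acc ++ [[start, if spill > 0 then start + bs + 1 else start + bs]])
    else acc

-- A's final clamp 'if len(batches) > 0 and batches[-1][1] > end_: batches[-1][1] = end_';
-- exact because every appended batch is a two-element list [start, this_end]
def pvClampA (end_ : Int) (batches : List (List Int)) : List (List Int) :=
  match batches.getLast? with
  | none => batches
  | some last =>
    if PySem.List.pyGetD last 1 0 > end_ then
      batches.dropLast ++ [[PySem.List.pyGetD last 0 0, end_]]
    else batches

def get_batch_indices (begin_ : Int) (end_ : Int) (workers : Int) : List (List Int) :=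
  let num_records := end_ - begin_
  let batch_size := PySem.Int.floordiv num_records workers
  let spill_over := PySem.Int.mod num_records workers
  pvClampA end_ (pvLoopA end_ batch_size (end_ - begin_).toNat begin_ spill_over [])

-- ===== PORT B =====
def get_batch_indices_alt (begin_ : Int) (end_ : Int) (workers : Int) : List (List Int) :=
  let num_records := end_ - begin_
  let batch_size := PySem.Int.floordiv num_records workers
  let spill_over := PySem.Int.mod num_records workers
  let n := if num_records > 0 then min workers num_records else 0
  (PySem.List.pyRange 0 n 1).map (fun i =>
    [begin_ + i * batch_size + min i spill_over,
     begin_ + (i + 1) * batch_size + min (i + 1) spill_over])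

-- ===== PRECONDITION & SPEC =====
-- Pre_ excludes only inputs on which A never returns: workers = 0 (ZeroDivisionError) and
-- workers < 0 with begin_ < end_ (the while-loop's start decreases forever: divergence).
def Pre_get_batch_indices (begin_ : Int) (end_ : Int) (workers : Int) : Prop :=
  0 < workers ∨ (workers < 0 ∧ end_ ≤ begin_)
instance (begin_ : Int) (end_ : Int) (workers : Int) : Decidable (Pre_get_batch_indices begin_ end_ workers) := by unfold Pre_get_batch_indices; infer_instance

def pvWitness_get_batch_indices : Int × Int × Int := (0, 7, 3)

def Spec_get_batch_indices (begin_ : Int) (end_ : Int) (workers : Int) (out : List (List Int)) : Prop := out = get_batch_indices_alt begin_ end_ workers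
instance (begin_ : Int) (end_ : Int) (workers : Int) (out : List (List Int)) : Decidable (Spec_get_batch_indices begin_ end_ workers out) := by unfold Spec_get_batch_indices; infer_instance

-- ===== CLAIM (what is proved, stated in full; the proofs are below) =====
def Claim_equal_get_batch_indices : Prop := ∀ (begin_ : Int) (end_ : Int) (workers : Int), Dom_get_batch_indices begin_ end_ workers → Pre_get_batch_indices begin_ end_ workers → Spec_get_batch_indices begin_ end_ workers (get_batch_indices begin_ end_ workers)

-- ===== LEMMAS AND PROOFS =====

-- boundary formula; B's batch i is [pvB k, pvB (k+1)]
def pvB (begin_ q r i : Int) : Int := begin_ + i * q + min i r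

lemma pvB_lt (begin_ end_ workers q r n : Int)
    (hw : 0 < workers) (hE : q * workers + r = end_ - begin_)
    (hr0 : 0 ≤ r) (hrw : r < workers) (hn : n = min workers (end_ - begin_))
    (k : Int) (hk0 : 0 ≤ k) (hkn : k < n) : pvB begin_ q r k < end_ := by
  unfold pvB
  by_cases hq0 : 0 ≤ q
  · rcases eq_or_lt_of_le hq0 with hq | hq
    · -- q = 0 : num = r, n = r, k < r
      rw [← hq] at hE ⊢
      simp only [zero_mul, mul_zero, zero_add, add_zero] at hE ⊢
      omega
    · -- q ≥ 1 : k ≤ workers - 1, so k*q ≤ (workers-1)*q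
      have h1 : k * q ≤ (workers - 1) * q :=
        mul_le_mul_of_nonneg_right (by omega) hq0
      have h2 : (workers - 1) * q = q * workers - q := by ring
      have h3 : min k r ≤ r := min_le_right k r
      omega
  · -- q ≤ -1 : num < 0, contradicting 0 ≤ k < n ≤ num? (n ≤ num → n < 0)
    have hq1 : q ≤ -1 := by omega
    have hqw : q * workers ≤ (-1) * workers :=
      mul_le_mul_of_nonneg_right hq1 hw.le
    omega

lemma pvB_end (begin_ end_ workers q r n : Int)
    (hw : 0 < workers) (hE : q * workers + r = end_ - begin_)
    (hr0 : 0 ≤ r) (hrw : r < workers) (hnum : 0 < end_ - begin_)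
    (hn : n = min workers (end_ - begin_)) : pvB begin_ q r n = end_ := by
  unfold pvB
  by_cases hq0 : 0 ≤ q
  · rcases eq_or_lt_of_le hq0 with hq | hq
    · rw [← hq] at hE ⊢
      simp only [zero_mul, mul_zero, zero_add, add_zero] at hE ⊢
      omega
    · have h2 : workers * 1 ≤ workers * q := mul_le_mul_of_nonneg_left (by omega) hw.le
      have h3 : workers * q = q * workers := mul_comm _ _
      have hnw : n = workers := by omega
      rw [hnw]
      have h4 : min workers r = r := by omega
      rw [h4]
      have h5 : workers * q = q * workers := mul_comm _ _
      omega
  · have hq1 : q ≤ -1 := by omega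
    have hqw : q * workers ≤ (-1) * workers :=
      mul_le_mul_of_nonneg_right hq1 hw.le
    omega

lemma pvLoopA_inv (begin_ end_ workers q r n : Int)
    (hw : 0 < workers) (hE : q * workers + r = end_ - begin_)
    (hr0 : 0 ≤ r) (hrw : r < workers) (hnum : 0 < end_ - begin_)
    (hn : n = min workers (end_ - begin_)) :
    ∀ (fuel : Nat) (k : Int) (acc : List (List Int)), 0 ≤ k → k ≤ n → n - k ≤ (fuel : Int) →
      pvLoopA end_ q fuel (pvB begin_ q r k) (r - min k r) acc =
        acc ++ (PySem.List.pyRange k n 1).map (fun i => [pvB begin_ q r i, pvB begin_ q r (i+1)]) := by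
  intro fuel
  induction fuel with
  | zero =>
    intro k acc hk0 hkn hf
    have hkeq : k = n := by omega
    subst hkeq
    simp [pvLoopA, PySem.List.pyRange_one_eq_nil (le_refl k)]
  | succ m ih =>
    intro k acc hk0 hkn hf
    rcases eq_or_lt_of_le hkn with hkeq | hklt
    · subst hkeq
      have hend : pvB begin_ q r k = end_ := pvB_end begin_ end_ workers q r k hw hE hr0 hrw hnum hn
      simp [pvLoopA, hend, PySem.List.pyRange_one_eq_nil (le_refl k)]
    · have hlt : pvB begin_ q r k < end_ := pvB_lt begin_ end_ workers q r n hw hE hr0 hrw hn k hk0 hklt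
      have hmin : min k r = if k < r then k else r := by omega
      have hstep : (if r - min k r > 0 then pvB begin_ q r k + q + 1 else pvB begin_ q r k + q) = pvB begin_ q r (k+1) := by
        unfold pvB
        split_ifs with h
        · have h1 : min k r = k := by omega
          have h2 : min (k+1) r = k+1 := by omega
          rw [h1, h2]; ring
        · have h1 : min k r = r := by omega
          have h2 : min (k+1) r = r := by omega
          rw [h1, h2]; ring
      have hspill : (if r - min k r > 0 then r - min k r - 1 else r - min k r) = r - min (k+1) r := by
        split_ifs with h <;> omega
      rw [PySem.List.pyRange_one_cons hklt]
      simp only [pvLoopA, if_pos hlt]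
      rw [hstep, hspill, ih (k+1) (acc ++ [[pvB begin_ q r k, pvB begin_ q r (k+1)]]) (by omega) (by omega) (by push_cast at hf ⊢; omega)]
      simp

lemma clamp_noop (end_ : Int) (f : Int → List Int) (n : Int)
    (hlast : ∀ i, 0 ≤ i → i < n → ∃ a b, f i = [a, b] ∧ b ≤ end_) :
    pvClampA end_ ((PySem.List.pyRange 0 n 1).map f) = (PySem.List.pyRange 0 n 1).map f := by
  unfold pvClampA
  rcases le_or_gt n 0 with hn | hn
  · simp [PySem.List.pyRange_one_eq_nil hn]
  · have hsplit : PySem.List.pyRange 0 n 1 = PySem.List.pyRange 0 (n-1) 1 ++ [n-1] := by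
      have := PySem.List.pyRange_one_succ_right (a := 0) (b := n - 1) (by omega)
      simpa using this
    rw [hsplit]
    simp only [List.map_append, List.map_cons, List.map_nil, List.getLast?_append,
      List.getLast?_singleton, Option.some_or]
    obtain ⟨a, b, hf, hle⟩ := hlast (n-1) (by omega) (by omega)
    have hnotgt : ¬ PySem.List.pyGetD (f (n-1)) 1 0 > end_ := by
      rw [hf]; simp [PySem.List.pyGetD, PySem.List.pyGet?, PySem.List.pyIdx?]; omega
    simp [hnotgt]

-- ===== VERDICT (by name: the statement is the Claim_ definition above) =====
theorem get_batch_indices_spec : Claim_equal_get_batch_indices := by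
  intro begin_ end_ workers _ hpre
  unfold Spec_get_batch_indices get_batch_indices get_batch_indices_alt
  dsimp only
  rcases hpre with hw | ⟨hw, hle⟩
  · -- workers > 0
    set num := end_ - begin_ with hnumdef
    set q := PySem.Int.floordiv num workers with hq
    set r := PySem.Int.mod num workers with hr
    have hwne : workers ≠ 0 := by omega
    have hE : q * workers + r = num := PySem.Int.floordiv_mul_add_mod num workers
    have hr0 : 0 ≤ r := by
      rw [hr, PySem.Int.mod_eq_emod_of_pos hw]; exact Int.emod_nonneg num hwne
    have hrw : r < workers := by
      rw [hr, PySem.Int.mod_eq_emod_of_pos hw]; exact Int.emod_lt_of_pos num hw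
    rcases le_or_gt num 0 with hnum | hnum
    · -- empty or inverted range: loop never runs, B's count is 0
      have hfuel : num.toNat = 0 := by omega
      have hiff : ¬ num > 0 := by omega
      rw [hfuel, if_neg hiff]
      simp [pvLoopA, pvClampA, PySem.List.pyRange_one_eq_nil (le_refl (0:Int))]
    · rw [if_pos hnum]
      set n := min workers num with hn
      have hE' : q * workers + r = end_ - begin_ := by rw [← hnumdef]; exact hE
      have hnum' : 0 < end_ - begin_ := by omega
      have hn' : n = min workers (end_ - begin_) := by rw [hn, ← hnumdef]
      have hn0 : 0 ≤ n := le_min hw.le hnum.le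
      have hinv := pvLoopA_inv begin_ end_ workers q r n hw hE' hr0 hrw hnum' hn'
        num.toNat 0 [] (le_refl 0) hn0
        (by have h := min_le_right workers num; rw [hn]; omega)
      have hB0 : pvB begin_ q r 0 = begin_ := by unfold pvB; omega
      have hs0 : r - min 0 r = r := by omega
      rw [hB0, hs0, List.nil_append] at hinv
      rw [hinv]
      have hfun : (fun i => [pvB begin_ q r i, pvB begin_ q r (i+1)]) =
          (fun i => [begin_ + i * q + min i r, begin_ + (i + 1) * q + min (i + 1) r]) := by
        funext i; simp [pvB]
      rw [← hfun]
      exact clamp_noop end_ _ n (by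
        intro i hi0 hin
        refine ⟨pvB begin_ q r i, pvB begin_ q r (i+1), rfl, ?_⟩
        rcases eq_or_lt_of_le (show i + 1 ≤ n by omega) with he | hl
        · rw [he]
          exact le_of_eq (pvB_end begin_ end_ workers q r n hw hE' hr0 hrw hnum' hn')
        · exact le_of_lt (pvB_lt begin_ end_ workers q r n hw hE' hr0 hrw hn' (i+1) (by omega) hl))
  · -- workers < 0 and end_ ≤ begin_ : both sides are []
    have hfuel : (end_ - begin_).toNat = 0 := by omega
    have hiff : ¬ end_ - begin_ > 0 := by omega
    rw [hfuel, if_neg hiff]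
    simp [pvLoopA, pvClampA, PySem.List.pyRange_one_eq_nil (le_refl (0:Int))]
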